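-- pv_equiv track=rewrite | github.com/cszaiti/SDP | codebert_graphcodebert_unixcoder/code/qz3.py | custom_split_lines
-- ===== SOURCE A (Python) =====
-- def custom_split_lines(code):
--     result = []
--     current = ''
--     i = 0
--     length = len(code)
--     while i < length:
--         current += code[i]
--         if code[i] == '\n':
--             # 检查下一个字符
--             if i + 1 < length and code[i + 1] == '\n':
--                 # 连续的\n，继续累加
--                 i += 1
--                 continue
--             else:
--                 # 下一个不是\n，当前行结束
--                 result.append(current)
--                 current = ''
--         i += 1
--     if current:
--         result.append(current)
--     return result
-- ===== SOURCE B (Python) =====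
-- def custom_split_lines(code):
--     pieces = code.split('\n')
--     result = []
--     for piece in pieces[:-1]:
--         if piece == '' and result:
--             result[-1] += '\n'
--         else:
--             result.append(piece + '\n')
--     if pieces[-1]:
--         result.append(pieces[-1])
--     return result
-- ===== Notes on version B (the rewrite author's own statement) =====
-- stated objective: faster
-- what changed: Replaces A's character-by-character index loop with lookahead and quadratic string accumulation by a single str.split on the newline character followed by a linear fold that merges empty pieces (consecutive newlines) into the previous segment.
import Mathlib
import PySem

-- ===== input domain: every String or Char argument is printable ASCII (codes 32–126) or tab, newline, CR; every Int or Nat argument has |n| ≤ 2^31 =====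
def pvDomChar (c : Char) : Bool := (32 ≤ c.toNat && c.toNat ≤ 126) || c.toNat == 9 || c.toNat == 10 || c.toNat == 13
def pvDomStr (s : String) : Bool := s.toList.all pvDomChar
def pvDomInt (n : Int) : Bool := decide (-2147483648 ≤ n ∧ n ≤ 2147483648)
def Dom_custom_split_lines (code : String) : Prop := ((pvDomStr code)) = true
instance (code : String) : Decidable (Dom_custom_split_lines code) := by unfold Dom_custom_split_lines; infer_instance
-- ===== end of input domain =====

-- B replaces A's char-by-char lookahead loop with quadratic string accumulation by a
-- newline split plus a linear fold merging empty pieces into the previous segment (faster).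

-- ===== PORT A =====
-- the while loop: one char consumed per iteration; `code[i+1]` with its bounds test is the
-- head of the remaining list
def cslA_loop : List Char → List Char → List (List Char) → List (List Char)
  | [], current, result => if current ≠ [] then result ++ [current] else result
  | c :: rest, current, result =>
    let current' := current ++ [c]
    if c = '\n' then
      if rest.head? = some '\n' then cslA_loop rest current' result
      else cslA_loop rest [] (result ++ [current'])
    else cslA_loop rest current' result

def custom_split_lines (code : String) : List String :=
  (cslA_loop code.toList [] []).map String.mk

-- ===== PORT B =====
-- loop body of Source B; result[-1] is the total `getLast?.getD []` (only read when res ≠ [])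
def cslB_step (res : List (List Char)) (p : List Char) : List (List Char) :=
  if p = [] ∧ res ≠ [] then res.dropLast ++ [(res.getLast?.getD []) ++ ['\n']]
  else res ++ [p ++ ['\n']]

def custom_split_lines_alt (code : String) : List String :=
  let pieces := PySem.Chars.splitOn code.toList ['\n']   -- code.split('\n')
  let result := pieces.dropLast.foldl cslB_step []        -- for piece in pieces[:-1]: …
  (if pieces.getLast?.getD [] ≠ [] then result ++ [pieces.getLast?.getD []] else result).map String.mk

-- ===== PRECONDITION & SPEC =====
def Spec_custom_split_lines (code : String) (out : List String) : Prop := out = custom_split_lines_alt code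
instance (code : String) (out : List String) : Decidable (Spec_custom_split_lines code out) := by unfold Spec_custom_split_lines; infer_instance

-- ===== CLAIM (what is proved, stated in full; the proofs are below) =====
def Claim_equal_custom_split_lines : Prop := ∀ (code : String), Dom_custom_split_lines code → Spec_custom_split_lines code (custom_split_lines code)

-- ===== LEMMAS AND PROOFS =====

-- simple recursive description of split('\n') (proof-side only)
def pvSplit : List Char → List (List Char)
  | [] => [[]]
  | c :: rest =>
    if c = '\n' then [] :: pvSplit rest
    else match pvSplit rest with
      | [] => [[c]]
      | p :: ps => (c :: p) :: ps

-- B's whole body on char lists (proof-side only)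
def pvBcore (cs : List Char) : List (List Char) :=
  if (pvSplit cs).getLast?.getD [] ≠ [] then
    (pvSplit cs).dropLast.foldl cslB_step [] ++ [(pvSplit cs).getLast?.getD []]
  else (pvSplit cs).dropLast.foldl cslB_step []

theorem pvSplit_ne_nil (cs : List Char) : pvSplit cs ≠ [] := by
  cases cs with
  | nil => simp [pvSplit]
  | cons c rest =>
    simp only [pvSplit]
    split
    · simp
    · split <;> simp

theorem splitOn_go_eq (l : List Char) : ∀ f, l.length ≤ f → ∀ cur acc,
    PySem.Chars.splitOn.go ['\n'] f l cur acc =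
      acc.reverse ++ ((cur.reverse ++ (pvSplit l).headI) :: (pvSplit l).tail) := by
  induction l with
  | nil =>
    intro f _ cur acc
    cases f with
    | zero => rw [PySem.Chars.splitOn.go]; simp [pvSplit]
    | succ f =>
      rw [PySem.Chars.splitOn.go]
      · simp [pvSplit]
      · omega
  | cons c rest ih =>
    intro f hf cur acc
    cases f with
    | zero => simp at hf
    | succ f =>
      rw [PySem.Chars.splitOn.go]
      have hf' : rest.length ≤ f := by simp at hf; omega
      by_cases hc : c = '\n'
      · subst hc
        rw [if_pos (by simp [List.isPrefixOf])]
        rw [show List.drop (['\n'] : List Char).length ('\n' :: rest) = rest by simp]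
        rw [ih f hf' [] (cur.reverse :: acc)]
        cases hps : pvSplit rest with
        | nil => exact absurd hps (pvSplit_ne_nil rest)
        | cons p ps => simp [pvSplit, hps]
      · rw [if_neg (by simp [List.isPrefixOf]; exact fun h => absurd h.symm hc)]
        rw [ih f hf' (c :: cur) acc]
        cases hps : pvSplit rest with
        | nil => exact absurd hps (pvSplit_ne_nil rest)
        | cons p ps => simp [pvSplit, hps, hc]

theorem splitOn_eq (cs : List Char) : PySem.Chars.splitOn cs ['\n'] = pvSplit cs := by
  unfold PySem.Chars.splitOn
  rw [splitOn_go_eq cs (cs.length + 1) (by omega) [] []]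
  cases hps : pvSplit cs with
  | nil => exact absurd hps (pvSplit_ne_nil cs)
  | cons p ps => simp

-- A over a newline-free prefix just accumulates it
theorem cslA_noNL (t : List Char) (h : ∀ c ∈ t, c ≠ '\n') :
    ∀ cs cur res, cslA_loop (t ++ cs) cur res = cslA_loop cs (cur ++ t) res := by
  induction t with
  | nil => simp
  | cons c t' ih =>
    intro cs cur res
    have hc : c ≠ '\n' := h c (by simp)
    simp only [List.cons_append, cslA_loop, if_neg hc]
    rw [ih (fun d hd => h d (by simp [hd])) cs (cur ++ [c]) res]
    simp

-- A over a maximal newline run flushes the current segment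
theorem cslA_run (k : ℕ) : ∀ (r : List Char), r.head? ≠ some '\n' → ∀ cur res,
    cslA_loop (List.replicate (k+1) '\n' ++ r) cur res =
      cslA_loop r [] (res ++ [cur ++ List.replicate (k+1) '\n']) := by
  induction k with
  | zero =>
    intro r hr cur res
    rw [show List.replicate (0+1) '\n' ++ r = '\n' :: r by simp]
    simp only [cslA_loop]
    rw [if_pos trivial, if_neg hr]
    simp
  | succ k ih =>
    intro r hr cur res
    have hhead : (List.replicate (k+1) '\n' ++ r).head? = some '\n' := by
      simp [List.replicate_succ]
    rw [show List.replicate (k+1+1) '\n' ++ r = '\n' :: (List.replicate (k+1) '\n' ++ r) by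
      simp [List.replicate_succ]]
    simp only [cslA_loop]
    rw [if_pos trivial, if_pos hhead, ih r hr (cur ++ ['\n']) res]
    congr 2
    simp [List.replicate_succ]

-- fold step from a nonempty accumulator factors
theorem foldB_factor (ps : List (List Char)) : ∀ (res acc : List (List Char)), acc ≠ [] →
    List.foldl cslB_step (res ++ acc) ps = res ++ List.foldl cslB_step acc ps := by
  induction ps with
  | nil => intro res acc _; simp
  | cons p ps' ih =>
    intro res acc hacc
    simp only [List.foldl_cons]
    have hstep : cslB_step (res ++ acc) p = res ++ cslB_step acc p ∧ cslB_step acc p ≠ [] := by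
      unfold cslB_step
      by_cases hp : p = []
      · rw [if_pos ⟨hp, by simp [hacc]⟩, if_pos ⟨hp, hacc⟩]
        constructor
        · rw [List.dropLast_append, List.getLast?_append]
          cases acc with
          | nil => exact absurd rfl hacc
          | cons a as =>
            cases h : (a :: as).getLast? with
            | none => simp at h
            | some x => simp [h]
        · intro h; simp at h
      · rw [if_neg (by tauto), if_neg (by tauto)]
        constructor
        · simp
        · intro h; simp at h
    rw [hstep.1, ih res (cslB_step acc p) hstep.2]

-- folding a run of empty pieces appends newlines to the last segment
theorem foldB_empties (m : ℕ) : ∀ (res : List (List Char)) (s : List Char),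
    List.foldl cslB_step (res ++ [s]) (List.replicate m []) =
      res ++ [s ++ List.replicate m '\n'] := by
  induction m with
  | zero => intro res s; simp
  | succ m ih =>
    intro res s
    simp only [List.replicate_succ, List.foldl_cons]
    have : cslB_step (res ++ [s]) [] = res ++ [s ++ ['\n']] := by
      unfold cslB_step
      rw [if_pos ⟨rfl, by simp⟩]
      simp [List.dropLast_concat]
    rw [this, ih res (s ++ ['\n'])]
    simp [List.replicate_succ]

-- head of dropWhile fails the predicate
theorem head_dropWhile {α : Type} (p : α → Bool) (l : List α) {c : α} {r : List α}
    (h : List.dropWhile p l = c :: r) : p c = false := by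
  induction l with
  | nil => simp [List.dropWhile] at h
  | cons a l' ih =>
    rw [List.dropWhile_cons] at h
    split at h
    · exact ih h
    · next hpc => cases h; simpa using hpc

-- pvSplit over a newline-free prefix
theorem pvSplit_noNL (t : List Char) (h : ∀ c ∈ t, c ≠ '\n') (cs : List Char) :
    pvSplit (t ++ cs) = (t ++ (pvSplit cs).headI) :: (pvSplit cs).tail := by
  induction t with
  | nil =>
    cases hcs : pvSplit cs with
    | nil => exact absurd hcs (pvSplit_ne_nil cs)
    | cons p ps => simp [hcs]
  | cons c t' ih =>
    have hc : c ≠ '\n' := h c (by simp)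
    simp only [List.cons_append, pvSplit, if_neg hc]
    rw [ih (fun d hd => h d (by simp [hd]))]

theorem pvSplit_run (k : ℕ) : ∀ (r : List Char),
    pvSplit (List.replicate k '\n' ++ r) = List.replicate k [] ++ pvSplit r := by
  induction k with
  | zero => simp
  | succ k ih =>
    intro r
    simp [List.replicate_succ, List.cons_append, pvSplit, ih r]

-- the head segment of pvSplit on a list not starting with '\n' is nonempty
theorem pvSplit_headI_ne_nil (c : Char) (rest : List Char) (hc : c ≠ '\n') :
    (pvSplit (c :: rest)).headI ≠ [] := by
  simp only [pvSplit, if_neg hc]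
  cases pvSplit rest <;> simp

-- the core equivalence, by strong induction on the string length
theorem core_eq (n : ℕ) : ∀ (cs : List Char), cs.length ≤ n → ∀ res,
    cslA_loop cs [] res = res ++ pvBcore cs := by
  induction n with
  | zero =>
    intro cs h res
    have : cs = [] := by cases cs <;> simp_all
    subst this
    simp [cslA_loop, pvBcore, pvSplit]
  | succ n ih =>
    intro cs hlen res
    rcases eq_or_ne cs [] with rfl | hne
    · simp [cslA_loop, pvBcore, pvSplit]
    set t := cs.takeWhile (fun c => c ≠ '\n') with ht
    set r1 := cs.dropWhile (fun c => c ≠ '\n') with hr1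
    have hsplit : t ++ r1 = cs := List.takeWhile_append_dropWhile
    have htno : ∀ c ∈ t, c ≠ '\n' := by
      intro c hc
      have := List.mem_takeWhile_imp hc
      simpa using this
    cases hr1e : r1 with
    | nil =>
      -- no newline at all
      have hcs : cs = t := by rw [← hsplit, hr1e, List.append_nil]
      have htne : t ≠ [] := by rw [← hcs]; exact hne
      rw [hcs, ← List.append_nil t, cslA_noNL t htno]
      simp only [cslA_loop, List.nil_append, if_pos htne]
      unfold pvBcore
      rw [pvSplit_noNL t htno []]
      simp [pvSplit, htne]
    | cons c r2 =>
      have hc : c = '\n' := by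
        have := head_dropWhile _ cs (hr1 ▸ hr1e)
        simpa using this
      -- the newline run inside r1
      set nl := r1.takeWhile (fun c => c = '\n') with hnl
      set r := r1.dropWhile (fun c => c = '\n') with hr
      have hsplit2 : nl ++ r = r1 := List.takeWhile_append_dropWhile
      have hnlrep : nl = List.replicate nl.length '\n' := by
        apply List.eq_replicate_of_mem
        intro b hb
        have := List.mem_takeWhile_imp hb
        simpa using this
      have hk1 : 1 ≤ nl.length := by
        rw [hnl, hr1e, hc]
        simp [List.takeWhile_cons]
      have hrhead : r.head? ≠ some '\n' := by
        cases hre : r with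
        | nil => simp
        | cons c' r' =>
          have := head_dropWhile _ r1 (hr ▸ hre)
          simp at this
          simp [hre, this]
      obtain ⟨k, hk⟩ : ∃ k, nl.length = k + 1 := ⟨nl.length - 1, by omega⟩
      have hcs2 : cs = t ++ (List.replicate (k+1) '\n' ++ r) := by
        rw [← hsplit, ← hsplit2, ← hk, ← hnlrep]
      have hrlen : r.length ≤ n := by
        have h1 : cs.length = t.length + (k + 1) + r.length := by
          rw [hcs2]; simp; omega
        omega
      -- A side
      rw [hcs2, cslA_noNL t htno, cslA_run k r hrhead, ih r hrlen]
      simp only [List.nil_append]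
      -- B side: a full segment is one element of B's result
      have hPne : pvSplit r ≠ [] := pvSplit_ne_nil r
      have hB : pvBcore (t ++ (List.replicate (k+1) '\n' ++ r)) =
          (t ++ List.replicate (k+1) '\n') :: pvBcore r := by
        have hpieces : pvSplit (t ++ (List.replicate (k+1) '\n' ++ r)) =
            (t :: List.replicate k []) ++ pvSplit r := by
          rw [pvSplit_noNL t htno, pvSplit_run (k+1) r]
          simp [List.replicate_succ]
        have hfold1 : List.foldl cslB_step [] (t :: List.replicate k []) =
            [t ++ List.replicate (k+1) '\n'] := by
          simp only [List.foldl_cons]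
          have h0 : cslB_step [] t = [] ++ [t ++ ['\n']] := by
            unfold cslB_step
            rw [if_neg (by rintro ⟨_, h⟩; exact h rfl)]
          rw [h0, foldB_empties k [] (t ++ ['\n'])]
          simp [List.replicate_succ]
        have hdrop : ((t :: List.replicate k []) ++ pvSplit r).dropLast =
            (t :: List.replicate k []) ++ (pvSplit r).dropLast := by
          rw [List.dropLast_append]
          simp [hPne]
        have hlast : ((t :: List.replicate k []) ++ pvSplit r).getLast?.getD [] =
            (pvSplit r).getLast?.getD [] := by
          rw [List.getLast?_append]
          cases h : (pvSplit r).getLast? with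
          | none => exact absurd (List.getLast?_eq_none_iff.mp h) hPne
          | some x => simp
        have hfold2 : List.foldl cslB_step [t ++ List.replicate (k+1) '\n'] (pvSplit r).dropLast
            = (t ++ List.replicate (k+1) '\n') :: List.foldl cslB_step [] (pvSplit r).dropLast := by
          cases hPd : (pvSplit r).dropLast with
          | nil => simp
          | cons q qs =>
            have hq : q ≠ [] := by
              cases hre : r with
              | nil => rw [hre] at hPd; simp [pvSplit] at hPd
              | cons c' r' =>
                have hc' : c' ≠ '\n' := by
                  intro h
                  exact hrhead (by rw [hre, h]; rfl)
                have hh := pvSplit_headI_ne_nil c' r' hc'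
                rw [hre] at hPd
                cases hPs : pvSplit (c' :: r') with
                | nil => exact absurd hPs (pvSplit_ne_nil _)
                | cons p0 P' =>
                  rw [hPs] at hPd hh
                  cases P' with
                  | nil => simp at hPd
                  | cons p1 P'' =>
                    rw [List.dropLast_cons₂] at hPd
                    injection hPd with h1 _
                    rw [← h1]
                    simpa using hh
            have hstep : cslB_step [t ++ List.replicate (k+1) '\n'] q =
                [t ++ List.replicate (k+1) '\n'] ++ [q ++ ['\n']] := by
              unfold cslB_step
              rw [if_neg (by rintro ⟨h, _⟩; exact hq h)]
            have hstep0 : cslB_step [] q = [q ++ ['\n']] := by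
              unfold cslB_step
              rw [if_neg (by rintro ⟨_, h⟩; exact h rfl)]
              simp
            simp only [List.foldl_cons, hstep, hstep0]
            exact foldB_factor qs [t ++ List.replicate (k+1) '\n'] [q ++ ['\n']] (by simp)
        unfold pvBcore
        rw [hpieces, hdrop, hlast, List.foldl_append, hfold1, hfold2]
        split_ifs <;> simp
      rw [hB]
      simp

-- ===== VERDICT (by name: the statement is the Claim_ definition above) =====
theorem custom_split_lines_spec : Claim_equal_custom_split_lines := by
  intro code _
  unfold Spec_custom_split_lines custom_split_lines custom_split_lines_alt
  rw [splitOn_eq, core_eq code.toList.length code.toList le_rfl []]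
  rfl
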